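-- pv_equiv track=rewrite | github.com/seunghwanly/CODING-TEST | Backjoon/1292/solution.py | sum
-- ===== SOURCE A (Python) =====
-- def sum(number):
--     res = 0
--     cnt = 0
--     limit = 1
--     while True:
--         for i in range(limit):
--             if cnt == number: return res
--             res += limit
--             cnt += 1
--         limit += 1
-- ===== SOURCE B (Python) =====
-- def sum(number):
--     # closed form: binary-search the block index k (largest k with k*(k+1)//2 <= number),
--     # then sum of full blocks 1^2+...+k^2 plus the partial block, all in O(log n).
--     lo, hi = 0, number
--     while lo < hi:
--         mid = (lo + hi + 1) // 2
--         if mid * (mid + 1) // 2 <= number: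
--             lo = mid
--         else:
--             hi = mid - 1
--     k = lo
--     return k * (k + 1) * (2 * k + 1) // 6 + (number - k * (k + 1) // 2) * (k + 1)
-- ===== Notes on version B (the rewrite author's own statement) =====
-- stated objective: faster
-- what changed: Replaces the term-by-term double loop with a binary search for the block index k (largest k with k(k+1)/2 <= number) followed by closed-form arithmetic (sum of squares plus partial block).
import Mathlib
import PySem

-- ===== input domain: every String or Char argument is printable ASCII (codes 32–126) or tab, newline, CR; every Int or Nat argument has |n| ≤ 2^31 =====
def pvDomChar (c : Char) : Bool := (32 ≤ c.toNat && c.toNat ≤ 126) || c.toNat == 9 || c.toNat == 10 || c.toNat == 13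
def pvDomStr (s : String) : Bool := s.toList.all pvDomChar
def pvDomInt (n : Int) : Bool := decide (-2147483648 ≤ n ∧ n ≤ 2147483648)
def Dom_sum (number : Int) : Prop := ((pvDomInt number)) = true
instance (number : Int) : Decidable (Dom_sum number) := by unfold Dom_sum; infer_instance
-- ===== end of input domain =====

-- B replaces A's term-by-term O(number) double loop with an O(log number) binary search
-- for the block index plus closed-form arithmetic.

-- ===== PORT A =====
-- the inner 'for i in range(limit)' loop: returns (some res) on early return,
-- otherwise (none, res', cnt') after the range is exhausted
def sumInner (number limit : Int) (res cnt : Int) : Nat → (Option Int) × Int × Int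
  | 0 => (none, res, cnt)
  | Nat.succ i =>
    if cnt = number then (some res, res, cnt)
    else sumInner number limit (res + limit) (cnt + 1) i

-- the 'while True' outer loop; fuel number.toNat + 1 outer passes suffices for
-- 0 ≤ number (for number < 0 the Python loop never returns)
def sumOuter (number : Int) (res cnt limit : Int) : Nat → Int
  | 0 => 0
  | Nat.succ fuel =>
    match sumInner number limit res cnt limit.toNat with
    | (some r, _, _) => r
    | (none, res', cnt') => sumOuter number res' cnt' (limit + 1) fuel

def sum (number : Int) : Int := sumOuter number 0 0 1 (number.toNat + 1)

-- ===== PORT B =====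
-- midpoint bounds used for termination of the binary search
theorem bs_mid_lt (lo hi : Int) (h : lo < hi) :
    lo < PySem.Int.floordiv (lo + hi + 1) 2 ∧ PySem.Int.floordiv (lo + hi + 1) 2 ≤ hi := by
  rw [PySem.Int.floordiv_eq_ediv_of_pos (by omega : (0:Int) < 2)]
  omega

def bsLoop (number lo hi : Int) : Int :=
  if h : lo < hi then
    let mid := PySem.Int.floordiv (lo + hi + 1) 2
    if PySem.Int.floordiv (mid * (mid + 1)) 2 ≤ number then
      bsLoop number mid hi
    else
      bsLoop number lo (mid - 1)
  else lo
termination_by (hi - lo).toNat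
decreasing_by
  · have := bs_mid_lt lo hi h; omega
  · have := bs_mid_lt lo hi h; omega

def sum_alt (number : Int) : Int :=
  let k := bsLoop number 0 number
  PySem.Int.floordiv (k * (k + 1) * (2 * k + 1)) 6 +
    (number - PySem.Int.floordiv (k * (k + 1)) 2) * (k + 1)

-- ===== PRECONDITION & SPEC =====
-- Pre_ excludes number < 0, where A's 'while True' loop never returns (cnt never equals number).
def Pre_sum (number : Int) : Prop := 0 ≤ number
instance (number : Int) : Decidable (Pre_sum number) := by unfold Pre_sum; infer_instance
def pvWitness_sum : Int := (5)

def Spec_sum (number : Int) (out : Int) : Prop := out = sum_alt number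
instance (number : Int) (out : Int) : Decidable (Spec_sum number out) := by unfold Spec_sum; infer_instance

-- ===== CLAIM (what is proved, stated in full; the proofs are below) =====
def Claim_equal_sum : Prop := ∀ (number : Int), Dom_sum number → Pre_sum number → Spec_sum number (sum number)

-- ===== LEMMAS AND PROOFS =====

-- remaining work when m positions remain and the current block value is L
def W (m L : Nat) : Int :=
  if m < L then (m : Int) * L
  else if _h : L = 0 then 0
  else (L : Int) * L + W (m - L) (L + 1)
termination_by m
decreasing_by omega

def Tn : Nat → Int
  | 0 => 0
  | k + 1 => Tn k + ((k : Int) + 1)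

def Qn : Nat → Int
  | 0 => 0
  | k + 1 => Qn k + ((k : Int) + 1) ^ 2

theorem Tn_eq (k : Nat) : 2 * Tn k = (k : Int) * (k + 1) := by
  induction k with
  | zero => simp [Tn]
  | succ k ih => simp only [Tn]; push_cast; push_cast at ih; linear_combination ih

theorem Qn_eq (k : Nat) : 6 * Qn k = (k : Int) * (k + 1) * (2 * k + 1) := by
  induction k with
  | zero => simp [Qn]
  | succ k ih => simp only [Qn]; push_cast; push_cast at ih; linear_combination ih

theorem Tn_mono {a b : Nat} (h : a ≤ b) : Tn a ≤ Tn b := by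
  induction b with
  | zero => simp_all
  | succ b ih =>
    rcases Nat.lt_or_ge a (b + 1) with h' | h'
    · have := ih (by omega); simp only [Tn]; linarith
    · have : a = b + 1 := by omega
      subst this; exact le_refl _

theorem innerNone (number limit : Int) : ∀ (k : Nat) (res cnt : Int),
    (k : Int) ≤ number - cnt →
    sumInner number limit res cnt k = (none, res + k * limit, cnt + k) := by
  intro k
  induction k with
  | zero => intro res cnt _; simp [sumInner]
  | succ k ih =>
    intro res cnt h
    have hne : cnt ≠ number := by push_cast at h; omega
    simp only [sumInner, if_neg hne]
    rw [ih _ _ (by push_cast at h; omega)]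
    push_cast; ring_nf

theorem innerSome (number limit : Int) : ∀ (k : Nat) (res cnt : Int),
    0 ≤ number - cnt → number - cnt < (k : Int) →
    sumInner number limit res cnt k =
      (some (res + (number - cnt) * limit), res + (number - cnt) * limit, number) := by
  intro k
  induction k with
  | zero => intro res cnt h0 h1; push_cast at h1; omega
  | succ k ih =>
    intro res cnt h0 h1
    by_cases hc : cnt = number
    · subst hc; simp [sumInner]
    · simp only [sumInner, if_neg hc]
      rw [ih _ _ (by omega) (by push_cast at h1 ⊢; omega)]
      have : res + limit + (number - (cnt + 1)) * limit = res + (number - cnt) * limit := by ring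
      rw [this]

theorem outerEq (number : Int) : ∀ (fuel : Nat) (res cnt limit : Int),
    1 ≤ limit → 0 ≤ number - cnt → (number - cnt).toNat < fuel →
    sumOuter number res cnt limit fuel = res + W (number - cnt).toNat limit.toNat := by
  intro fuel
  induction fuel with
  | zero => intro _ _ _ _ _ h; omega
  | succ fuel ih =>
    intro res cnt limit hL hd hf
    have hLk : (limit.toNat : Int) = limit := Int.toNat_of_nonneg (by omega)
    have hdk : ((number - cnt).toNat : Int) = number - cnt := Int.toNat_of_nonneg hd
    by_cases hlt : (number - cnt).toNat < limit.toNat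
    · -- early return within this block
      have h1 : number - cnt < (limit.toNat : Int) := by omega
      rw [sumOuter, innerSome number limit limit.toNat res cnt hd h1]
      rw [W, if_pos hlt, hdk, hLk]
    · -- the block is exhausted; continue with limit + 1
      have h2 : (limit.toNat : Int) ≤ number - cnt := by omega
      rw [sumOuter, innerNone number limit limit.toNat res cnt h2]
      have hLk0 : limit.toNat ≠ 0 := by omega
      dsimp only
      rw [ih (res + limit.toNat * limit) (cnt + limit.toNat) (limit + 1) (by omega) (by omega)
        (by omega)]
      have e1 : (number - (cnt + (limit.toNat : Int))).toNat = (number - cnt).toNat - limit.toNat := by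
        omega
      have e2 : (limit + 1).toNat = limit.toNat + 1 := by omega
      conv_rhs => rw [W]
      rw [if_neg hlt, dif_neg hLk0, e1, e2, hLk]
      ring

-- the binary search returns the unique k with k(k+1) ≤ 2·number < (k+1)(k+2)
theorem bsLoopSpec (number : Int) : ∀ (t : Nat) (lo hi : Int), (hi - lo).toNat ≤ t →
    0 ≤ lo → lo ≤ hi → lo * (lo + 1) ≤ 2 * number → 2 * number < (hi + 1) * (hi + 2) →
    0 ≤ bsLoop number lo hi ∧
      bsLoop number lo hi * (bsLoop number lo hi + 1) ≤ 2 * number ∧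
      2 * number < (bsLoop number lo hi + 1) * (bsLoop number lo hi + 2) := by
  intro t
  induction t with
  | zero =>
    intro lo hi ht h0 hle hlo hhi
    have : lo = hi := by omega
    subst this
    rw [bsLoop, dif_neg (by omega)]
    exact ⟨h0, hlo, hhi⟩
  | succ t ih =>
    intro lo hi ht h0 hle hlo hhi
    rw [bsLoop]
    by_cases h : lo < hi
    · rw [dif_pos h]
      have hmid := bs_mid_lt lo hi h
      set mid := PySem.Int.floordiv (lo + hi + 1) 2 with hmdef
      have hcond : (PySem.Int.floordiv (mid * (mid + 1)) 2 ≤ number) ↔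
          mid * (mid + 1) ≤ 2 * number := by
        rw [PySem.Int.floordiv_eq_ediv_of_pos (by omega : (0:Int) < 2)]
        obtain ⟨c, hc⟩ := Int.even_mul_succ_self mid
        omega
      by_cases hb : PySem.Int.floordiv (mid * (mid + 1)) 2 ≤ number
      · rw [if_pos hb]
        exact ih mid hi (by omega) (by omega) (by omega) (hcond.mp hb) hhi
      · rw [if_neg hb]
        have h2 : 2 * number < mid * (mid + 1) := by
          have := (not_le.mp (fun hx => hb (hcond.mpr hx)))
          omega
        refine ih lo (mid - 1) (by omega) h0 (by omega) hlo ?_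
        have : (mid - 1 + 1) * (mid - 1 + 2) = mid * (mid + 1) := by ring
        rw [this]; exact h2
    · rw [dif_neg h]
      have hEq : lo = hi := by omega
      subst hEq
      exact ⟨h0, hlo, hhi⟩

-- closed form for W: J full blocks already consumed, current block value J+1
theorem Wclosed : ∀ (m : Nat), ∀ (J k : Nat), J ≤ k →
    Tn k - Tn J ≤ (m : Int) → (m : Int) < Tn (k + 1) - Tn J →
    W m (J + 1) = (Qn k - Qn J) + ((m : Int) - (Tn k - Tn J)) * ((k : Int) + 1) := by
  intro m
  induction m using Nat.strong_induction_on with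
  | _ m ih =>
    intro J k hJk hlo hhi
    by_cases hm : m < J + 1
    · have hkJ : k = J := by
        by_contra hne
        have hk1 : J + 1 ≤ k := by omega
        have := Tn_mono hk1
        have hT : Tn (J + 1) = Tn J + ((J : Int) + 1) := by simp [Tn]
        omega
      subst hkJ
      rw [W, if_pos hm]
      simp only [sub_self]
      have hT : Tn (k + 1) = Tn k + ((k : Int) + 1) := by simp [Tn]
      push_cast
      ring
    · have hk1 : J + 1 ≤ k := by
        by_contra hne
        have hkJ : k = J := by omega
        subst hkJ
        have hT : Tn (k + 1) = Tn k + ((k : Int) + 1) := by simp [Tn]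
        omega
      rw [W, if_neg hm, dif_neg (by omega : J + 1 ≠ 0)]
      have hT : Tn (J + 1) = Tn J + ((J : Int) + 1) := by simp [Tn]
      have hQ : Qn (J + 1) = Qn J + ((J : Int) + 1) ^ 2 := by simp [Qn]
      have hrec := ih (m - (J + 1)) (by omega) (J + 1) k hk1
        (by push_cast [Nat.cast_sub (by omega : J + 1 ≤ m)]; omega)
        (by push_cast [Nat.cast_sub (by omega : J + 1 ≤ m)] at hhi ⊢; omega)
      rw [hrec]
      push_cast [Nat.cast_sub (by omega : J + 1 ≤ m), hT, hQ]
      ring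

-- exact floor divisions used by B
theorem floordiv_exact {a b q : Int} (hb : 0 < b) (h : a = b * q) :
    PySem.Int.floordiv a b = q := by
  rw [PySem.Int.floordiv_eq_ediv_of_pos hb, h, Int.mul_ediv_cancel_left q (by omega)]

-- ===== VERDICT (by name: the statement is the Claim_ definition above) =====
theorem sum_spec : Claim_equal_sum := by
  intro number _hdom hpre
  unfold Spec_sum
  have hpre' : (0:Int) ≤ number := hpre
  -- A's value
  have hA : sum number = W number.toNat 1 := by
    have := outerEq number (number.toNat + 1) 0 0 1 (by omega) (by omega) (by omega)
    simpa [sum] using this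
  -- B's block index
  set k := bsLoop number 0 number with hkdef
  have hk := bsLoopSpec number (number - 0).toNat 0 number (le_refl _) (le_refl _) hpre'
    (by nlinarith) (by nlinarith)
  obtain ⟨hk0, hka, hkb⟩ := hk
  rw [← hkdef] at hk0 hka hkb
  -- W's closed form at k.toNat
  have hkc : (k.toNat : Int) = k := Int.toNat_of_nonneg hk0
  have hT : 2 * Tn k.toNat = k * (k + 1) := by rw [Tn_eq, hkc]
  have hT1 : 2 * Tn (k.toNat + 1) = (k + 1) * (k + 2) := by
    rw [Tn_eq]; push_cast [hkc]; ring
  have hQ : 6 * Qn k.toNat = k * (k + 1) * (2 * k + 1) := by rw [Qn_eq, hkc]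
  have hnc : (number.toNat : Int) = number := Int.toNat_of_nonneg hpre'
  have hTn0 : Tn 0 = (0:Int) := rfl
  have hW := Wclosed number.toNat 0 k.toNat (by omega)
    (by rw [hTn0]; omega) (by rw [hTn0]; omega)
  rw [hA, hW]
  simp only [Tn, Qn, sub_zero]
  -- B's value
  show Qn k.toNat + ((number.toNat : Int) - Tn k.toNat) * ((k.toNat : Int) + 1) = sum_alt number
  have hB1 : PySem.Int.floordiv (k * (k + 1) * (2 * k + 1)) 6 = Qn k.toNat :=
    floordiv_exact (by omega) (by omega)
  have hB2 : PySem.Int.floordiv (k * (k + 1)) 2 = Tn k.toNat :=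
    floordiv_exact (by omega) (by omega)
  simp only [sum_alt, ← hkdef, hB1, hB2, hnc, hkc]
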